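-- pv_equiv track=rewrite | github.com/dhanushkunchakuri/Proceduress | Testinggggg/app.py | resolve_tables
-- ===== SOURCE A (Python) =====
-- def resolve_tables(proc_name: str, calls_map: dict, tables_map: dict, visited=None):
--     """Recursively collect all tables used by proc_name and its callee graph."""
--     if visited is None:
--         visited = set()
--     if proc_name in visited:
--         return []
--     visited.add(proc_name)
--     out = list(tables_map.get(proc_name, []))
--     for callee in calls_map.get(proc_name, []):
--         out.extend(resolve_tables(callee, calls_map, tables_map, visited))
--     return list(dict.fromkeys(out))  # preserve order, unique
-- ===== SOURCE B (Python) =====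
-- def resolve_tables(proc_name: str, calls_map: dict, tables_map: dict, visited=None):
--     """Iterative DFS with an explicit stack; dedup once at the end."""
--     if visited is None:
--         visited = set()
--     if proc_name in visited:
--         return []
--     stack = [proc_name]
--     out = []
--     while stack:
--         node = stack.pop()
--         if node in visited:
--             continue
--         visited.add(node)
--         out.extend(tables_map.get(node, []))
--         stack.extend(reversed(list(calls_map.get(node, []))))
--     return list(dict.fromkeys(out))
-- ===== Notes on version B (the rewrite author's own statement) =====
-- stated objective: alternative
-- what changed: Replaces A's recursion (with a per-level dict.fromkeys dedup) by an explicit-stack iterative DFS that marks nodes on pop, pushes callees reversed to keep recursive preorder, and deduplicates the collected tables once at the end.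
import Mathlib
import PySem

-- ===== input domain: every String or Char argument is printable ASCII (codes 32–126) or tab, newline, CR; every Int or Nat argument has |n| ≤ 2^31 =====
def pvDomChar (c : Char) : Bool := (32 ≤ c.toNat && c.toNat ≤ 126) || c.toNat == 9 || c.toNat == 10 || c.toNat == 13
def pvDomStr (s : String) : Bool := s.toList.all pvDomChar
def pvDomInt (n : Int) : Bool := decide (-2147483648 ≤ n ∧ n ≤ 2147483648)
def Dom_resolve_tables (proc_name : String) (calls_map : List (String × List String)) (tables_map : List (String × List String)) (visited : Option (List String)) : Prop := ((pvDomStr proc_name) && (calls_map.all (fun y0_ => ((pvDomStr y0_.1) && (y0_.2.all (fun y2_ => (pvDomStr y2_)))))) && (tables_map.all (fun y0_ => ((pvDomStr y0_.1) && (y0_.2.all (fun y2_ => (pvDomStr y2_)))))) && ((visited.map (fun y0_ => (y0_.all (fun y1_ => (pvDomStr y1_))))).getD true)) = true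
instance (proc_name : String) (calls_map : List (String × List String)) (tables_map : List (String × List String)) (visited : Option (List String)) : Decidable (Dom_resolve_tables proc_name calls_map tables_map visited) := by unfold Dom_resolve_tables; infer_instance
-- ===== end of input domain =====

-- B replaces A's recursive DFS (per-level dedup) with an explicit-stack DFS and a single final dedup;
-- equivalence proved for the RETURN value (both Pythons add the same nodes to a caller-passed visited set).


-- ===== PORT A =====
-- literal port of A's recursion; the fuel argument only makes the nested recursion total
-- (calls_map.length + 1 always suffices: each recursion level enters a fresh node, and every
-- level that recurses further consumes a distinct key of calls_map; the 0-branch is unreachable).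
def goA (calls_map tables_map : List (String × List String)) : Nat → String → List String → List String × List String
  | 0, _, visited => ([], visited)
  | fuel+1, proc_name, visited =>
    if PySem.Set.contains visited proc_name then ([], visited)
    else
      let visited1 := PySem.Set.add visited proc_name
      let st := ((PySem.Dict.mk calls_map).getD proc_name []).foldl
        (fun (acc : List String × List String) callee =>
          let r := goA calls_map tables_map fuel callee acc.2
          (acc.1 ++ r.1, r.2))
        ((PySem.Dict.mk tables_map).getD proc_name [], visited1)
      (PySem.List.dedup st.1, st.2)

def resolve_tables (proc_name : String) (calls_map : List (String × List String)) (tables_map : List (String × List String)) (visited : Option (List String)) : List String :=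
  let vis : PySem.Set String := match visited with
    | none => PySem.Set.empty
    | some l => PySem.Set.ofList l
  (goA calls_map tables_map (calls_map.length + 1) proc_name vis).1

-- ===== PORT B =====
-- helpers the port's termination proof cites
def pvNK (calls_map : List (String × List String)) (vis : List String) : Nat :=
  ((calls_map.map Prod.fst).dedup.filter (fun k => decide (k ∉ vis))).length

theorem pvFilterLen_mono (p q : String → Bool) (h : ∀ a, p a = true → q a = true) :
    ∀ l : List String, (l.filter p).length ≤ (l.filter q).length := by
  intro l; induction l with
  | nil => simp
  | cons x xs ih =>
    by_cases hx : p x = true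
    · simp [List.filter, hx, h x hx]; omega
    · simp only [List.filter, Bool.not_eq_true] at hx ⊢
      rw [hx]
      cases hq : q x <;> simp <;> omega

theorem pvFilterLen_lt (p q : String → Bool) (h : ∀ a, p a = true → q a = true)
    (a : String) (hq : q a = true) (hp : p a = false) :
    ∀ l : List String, a ∈ l → (l.filter p).length < (l.filter q).length := by
  intro l; induction l with
  | nil => simp
  | cons x xs ih =>
    intro hm
    rcases List.mem_cons.mp hm with rfl | hm
    · simp only [List.filter, hp, hq]
      have := pvFilterLen_mono p q h xs
      simp; omega
    · have := ih hm
      by_cases hx : p x = true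
      · simp [List.filter, hx, h x hx]; omega
      · simp only [List.filter, Bool.not_eq_true] at hx ⊢
        rw [hx]
        cases hq' : q x <;> simp <;> omega

theorem pvNK_mono (calls_map : List (String × List String)) (vis vis' : List String)
    (h : ∀ a, a ∈ vis → a ∈ vis') : pvNK calls_map vis' ≤ pvNK calls_map vis := by
  apply pvFilterLen_mono
  intro a ha
  simp only [decide_eq_true_eq] at ha ⊢
  intro hmem; exact ha (h a hmem)

theorem pvNK_add_lt (calls_map : List (String × List String)) (vis : List String) (node : String)
    (hk : node ∈ calls_map.map Prod.fst) (hv : node ∉ vis) :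
    pvNK calls_map (vis ++ [node]) < pvNK calls_map vis := by
  refine pvFilterLen_lt _ _ ?_ node ?_ ?_ _ ?_
  · intro a ha
    simp only [decide_eq_true_eq, List.mem_append] at ha ⊢
    intro hmem; exact ha (Or.inl hmem)
  · simpa using hv
  · simp
  · simpa using hk

theorem pvGetD_nil_of_not_key (calls_map : List (String × List String)) (node : String)
    (h : ¬ node ∈ calls_map.map Prod.fst) : (PySem.Dict.mk calls_map).getD node [] = [] := by
  induction calls_map with
  | nil => rfl
  | cons kv rest ih =>
    simp only [List.map, List.mem_cons, not_or] at h
    have hb : (kv.1 == node) = false := by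
      simp only [beq_eq_false_iff_ne]; exact fun e => h.1 e.symm
    have hrest := ih h.2
    simp only [PySem.Dict.getD] at hrest ⊢
    rw [show (PySem.Dict.mk (kv :: rest)) = PySem.Dict.mk ((kv.1, kv.2) :: rest) by rfl,
        PySem.Dict.get?_mk_cons, hb]
    simpa using hrest

-- literal port of Source B's loop: the Lean list models the stack with its TOP AT THE HEAD
-- (Python pops from the end, so stack.extend(reversed(callees)) = callees ++ rest here).
def goB (calls_map tables_map : List (String × List String)) (stack : List String) (vis : List String) (out : List String) : List String × List String :=
  match stack with
  | [] => (out, vis)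
  | node :: rest =>
    if PySem.Set.contains vis node then
      goB calls_map tables_map rest vis out
    else
      goB calls_map tables_map (((PySem.Dict.mk calls_map).getD node []) ++ rest)
        (PySem.Set.add vis node)
        (out ++ (PySem.Dict.mk tables_map).getD node [])
termination_by (pvNK calls_map vis, stack.length)
decreasing_by
  · exact Prod.Lex.right _ (Nat.lt_succ_self _)
  · rename_i hcon
    have hv : node ∉ vis := by
      intro hm
      exact absurd ((PySem.Set.contains_iff vis node).mpr hm) hcon
    rw [PySem.Set.add_of_not_mem hv]
    by_cases hk : node ∈ calls_map.map Prod.fst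
    · exact Prod.Lex.left _ _ (pvNK_add_lt calls_map vis node hk hv)
    · have hnil := pvGetD_nil_of_not_key calls_map node hk
      rw [hnil]
      have hle : pvNK calls_map (vis ++ [node]) ≤ pvNK calls_map vis := by
        apply pvNK_mono; intro a ha; simp [ha]
      rcases Nat.lt_or_eq_of_le hle with hlt | heq
      · exact Prod.Lex.left _ _ hlt
      · rw [heq]; exact Prod.Lex.right _ (by simp)

def resolve_tables_alt (proc_name : String) (calls_map : List (String × List String)) (tables_map : List (String × List String)) (visited : Option (List String)) : List String :=
  let vis : PySem.Set String := match visited with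
    | none => PySem.Set.empty
    | some l => PySem.Set.ofList l
  if PySem.Set.contains vis proc_name then []
  else PySem.List.dedup (goB calls_map tables_map [proc_name] vis []).1

-- ===== PRECONDITION & SPEC =====
def Spec_resolve_tables (proc_name : String) (calls_map : List (String × List String)) (tables_map : List (String × List String)) (visited : Option (List String)) (out : List String) : Prop := out = resolve_tables_alt proc_name calls_map tables_map visited
instance (proc_name : String) (calls_map : List (String × List String)) (tables_map : List (String × List String)) (visited : Option (List String)) (out : List String) : Decidable (Spec_resolve_tables proc_name calls_map tables_map visited out) := by unfold Spec_resolve_tables; infer_instance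

-- ===== CLAIM (what is proved, stated in full; the proofs are below) =====
def Claim_equal_resolve_tables : Prop := ∀ (proc_name : String) (calls_map : List (String × List String)) (tables_map : List (String × List String)) (visited : Option (List String)), Dom_resolve_tables proc_name calls_map tables_map visited → Spec_resolve_tables proc_name calls_map tables_map visited (resolve_tables proc_name calls_map tables_map visited)

-- ===== LEMMAS AND PROOFS =====

-- ---- ordered-dedup (list(dict.fromkeys(..))) machinery ----
def pvDAux (seen : List String) : List String → List String
  | [] => []
  | x :: xs => if x ∈ seen then pvDAux seen xs else x :: pvDAux (seen ++ [x]) xs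

theorem pvFoldlAdd (l : List String) : ∀ acc : List String,
    l.foldl PySem.Set.add acc = acc ++ pvDAux acc l := by
  induction l with
  | nil => intro acc; simp [pvDAux]
  | cons x xs ih =>
    intro acc
    by_cases hx : x ∈ acc
    · simp [List.foldl, hx, pvDAux, ih]
    · simp [List.foldl, hx, pvDAux, ih]

theorem pvDedup_eq (l : List String) : PySem.List.dedup l = pvDAux [] l := by
  rw [PySem.List.dedup_eq_ofList, PySem.Set.ofList_eq_foldl, pvFoldlAdd]
  simp

theorem pvDAux_congr (l : List String) : ∀ (s s' : List String),
    (∀ a, a ∈ s ↔ a ∈ s') → pvDAux s l = pvDAux s' l := by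
  induction l with
  | nil => intro s s' _; rfl
  | cons x xs ih =>
    intro s s' h
    by_cases hx : x ∈ s
    · rw [pvDAux, pvDAux, if_pos hx, if_pos ((h x).mp hx)]
      exact ih s s' h
    · rw [pvDAux, pvDAux, if_neg hx, if_neg (fun c => hx ((h x).mpr c))]
      refine congrArg _ (ih _ _ ?_)
      intro a; simp only [List.mem_append, List.mem_singleton]
      exact or_congr (h a) Iff.rfl

theorem pvDAux_append (xs : List String) : ∀ (ys s : List String),
    pvDAux s (xs ++ ys) = pvDAux s xs ++ pvDAux (s ++ xs) ys := by
  induction xs with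
  | nil => intro ys s; simp [pvDAux]
  | cons x xs' ih =>
    intro ys s
    by_cases hx : x ∈ s
    · rw [List.cons_append, pvDAux, if_pos hx, pvDAux, if_pos hx, ih]
      refine congrArg _ (pvDAux_congr _ _ _ ?_)
      intro a
      simp only [List.mem_append, List.mem_cons]
      constructor
      · rintro (h | h) <;> tauto
      · rintro (h | rfl | h) <;> tauto
    · rw [List.cons_append, pvDAux, if_neg hx, pvDAux, if_neg hx, ih]
      rw [List.cons_append]
      refine congrArg _ (congrArg _ (pvDAux_congr _ _ _ ?_))
      intro a
      simp only [List.mem_append, List.mem_cons]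
      tauto

theorem pvDAux_nested (ys : List String) : ∀ (s t : List String),
    pvDAux s (pvDAux t ys) = pvDAux (s ++ t) ys := by
  induction ys with
  | nil => intro s t; rfl
  | cons x ys' ih =>
    intro s t
    by_cases hxt : x ∈ t
    · rw [pvDAux, if_pos hxt, ih, pvDAux, if_pos (by simp [hxt])]
    · by_cases hxs : x ∈ s
      · rw [pvDAux, if_neg hxt, pvDAux, if_pos hxs, ih,
          pvDAux, if_pos (by simp [hxs])]
        refine pvDAux_congr _ _ _ ?_
        intro a
        simp only [List.mem_append, List.mem_singleton]
        constructor
        · rintro (h | h | rfl) <;> tauto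
        · rintro (h | h) <;> tauto
      · rw [pvDAux, if_neg hxt, pvDAux, if_neg hxs, ih,
          pvDAux, if_neg (by simp [hxs, hxt]),
          List.append_assoc]
        refine congrArg _ (pvDAux_congr _ _ _ ?_)
        intro a
        simp only [List.mem_append, List.mem_singleton]
        tauto

-- dedup swallows an inner dedup of a middle chunk (A dedups per level, B once at the end)
theorem pvDedup_mid (xs y z : List String) :
    PySem.List.dedup (xs ++ (PySem.List.dedup y ++ z)) = PySem.List.dedup (xs ++ (y ++ z)):= by
  have hmy : ∀ a, a ∈ pvDAux [] y ↔ a ∈ y := by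
    intro a; rw [← pvDedup_eq]; exact PySem.List.mem_dedup y a
  rw [pvDedup_eq (xs ++ (PySem.List.dedup y ++ z)), pvDedup_eq (xs ++ (y ++ z)), pvDedup_eq y]
  rw [pvDAux_append xs _ [], pvDAux_append xs _ []]
  congr 1
  rw [pvDAux_append _ z, pvDAux_append _ z]
  have h1 : pvDAux ([] ++ xs) (pvDAux [] y) = pvDAux (([] ++ xs) ++ []) y := pvDAux_nested y _ []
  rw [h1]
  have h2 : pvDAux (([] ++ xs) ++ []) y = pvDAux ([] ++ xs) y := by
    refine pvDAux_congr _ _ _ ?_; intro a; simp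
  rw [h2]
  refine congrArg _ (pvDAux_congr _ _ _ ?_)
  intro a
  simp only [List.mem_append]
  exact or_congr Iff.rfl (hmy a)

-- ---- structural lemmas about B's loop ----
theorem pvGoB_acc (c t : List (String × List String)) (stack vis out : List String) :
    goB c t stack vis out = (out ++ (goB c t stack vis []).1, (goB c t stack vis []).2) := by
  refine goB.induct c t
    (motive := fun s v _ => ∀ o, goB c t s v o = (o ++ (goB c t s v []).1, (goB c t s v []).2))
    ?_ ?_ ?_ stack vis out out
  · intro vis out o; simp [goB]
  · intro vis out node rest hc ih o
    rw [goB, if_pos hc, goB, if_pos hc]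
    exact ih o
  · intro vis out node rest hc ih o
    rw [goB, if_neg hc, goB, if_neg hc]
    rw [ih, ih (([] : List String) ++ _)]
    simp
  
theorem pvGoB_append (c t : List (String × List String)) (stack vis out : List String) :
    ∀ ys, goB c t (stack ++ ys) vis out
      = goB c t ys (goB c t stack vis out).2 (goB c t stack vis out).1 := by
  refine goB.induct c t
    (motive := fun s v _ => ∀ o ys, goB c t (s ++ ys) v o
      = goB c t ys (goB c t s v o).2 (goB c t s v o).1) ?_ ?_ ?_ stack vis out out
  · intro vis out o ys; simp [goB]
  · intro vis out node rest hc ih o ys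
    rw [List.cons_append, goB, if_pos hc, goB, if_pos hc]
    exact ih o ys
  · intro vis out node rest hc ih o ys
    rw [List.cons_append, goB, if_neg hc, goB, if_neg hc]
    rw [← List.append_assoc]
    exact ih _ ys

theorem pvGoB_mono (c t : List (String × List String)) (stack vis out : List String) :
    ∀ a, a ∈ vis → a ∈ (goB c t stack vis out).2 := by
  refine goB.induct c t
    (motive := fun s v o => ∀ a, a ∈ v → a ∈ (goB c t s v o).2) ?_ ?_ ?_ stack vis out
  · intro vis out a ha; simpa [goB] using ha
  · intro vis out node rest hc ih a ha
    rw [goB, if_pos hc]; exact ih a ha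
  · intro vis out node rest hc ih a ha
    rw [goB, if_neg hc]
    refine ih a ?_
    rw [PySem.Set.add_eq_ite]
    split <;> simp [ha]

-- ---- A's recursion computes the dedup of B's loop output ----
theorem pvMain (c t : List (String × List String)) :
    ∀ (fuel : Nat) (vis : List String) (proc : String), pvNK c vis + 1 ≤ fuel →
      goA c t fuel proc vis
        = (PySem.List.dedup (goB c t [proc] vis []).1, (goB c t [proc] vis []).2) := by
  intro fuel
  induction fuel with
  | zero => intro vis proc h; omega
  | succ g ihg =>
    intro vis proc h
    by_cases hc : PySem.Set.contains vis proc = true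
    · rw [goA, if_pos hc, goB, if_pos hc, goB]
      rfl
    · have hv : proc ∉ vis := fun hm => hc ((PySem.Set.contains_iff vis proc).mpr hm)
      rw [goA, if_neg hc, goB, if_neg hc]
      by_cases hk : proc ∈ c.map Prod.fst
      · -- proc is a key of calls_map
        have hlt := pvNK_add_lt c vis proc hk hv
        rw [← PySem.Set.add_of_not_mem hv] at hlt
        have h1 : pvNK c (PySem.Set.add vis proc) + 1 ≤ g := by omega
        have hfold : ∀ (cs : List String) (acc vis' : List String), pvNK c vis' + 1 ≤ g →
            PySem.List.dedup ((cs.foldl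
              (fun (acc : List String × List String) callee =>
                let r := goA c t g callee acc.2
                (acc.1 ++ r.1, r.2)) (acc, vis')).1)
              = PySem.List.dedup (acc ++ (goB c t cs vis' []).1)
            ∧ (cs.foldl
              (fun (acc : List String × List String) callee =>
                let r := goA c t g callee acc.2
                (acc.1 ++ r.1, r.2)) (acc, vis')).2 = (goB c t cs vis' []).2 := by
          intro cs
          induction cs with
          | nil => intro acc vis' _; constructor <;> simp [goB]
          | cons c0 cs' ihcs =>
            intro acc vis' h'
            have hrec := ihg vis' c0 h'
            have hmono : pvNK c (goB c t [c0] vis' []).2 + 1 ≤ g := by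
              have := pvNK_mono c vis' ((goB c t [c0] vis' []).2)
                (fun a ha => pvGoB_mono c t [c0] vis' [] a ha)
              omega
            have hstep := ihcs (acc ++ PySem.List.dedup (goB c t [c0] vis' []).1)
              ((goB c t [c0] vis' []).2) hmono
            have hsplit : goB c t (c0 :: cs') vis' []
                = ((goB c t [c0] vis' []).1 ++ (goB c t cs' (goB c t [c0] vis' []).2 []).1,
                   (goB c t cs' (goB c t [c0] vis' []).2 []).2) := by
              have : (c0 :: cs') = [c0] ++ cs' := rfl
              rw [this, pvGoB_append c t [c0] vis' [] cs',
                pvGoB_acc c t cs' ((goB c t [c0] vis' []).2) ((goB c t [c0] vis' []).1)]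
            constructor
            · rw [List.foldl_cons]
              simp only [hrec]
              rw [hstep.1, hsplit]
              rw [List.append_assoc, pvDedup_mid]
            · rw [List.foldl_cons]
              simp only [hrec]
              rw [hstep.2, hsplit]
        have hres := hfold ((PySem.Dict.mk c).getD proc []) ((PySem.Dict.mk t).getD proc [])
          (PySem.Set.add vis proc) h1
        rw [List.append_nil, pvGoB_acc c t _ (PySem.Set.add vis proc)]
        exact Prod.ext (by simpa using hres.1) (by simpa using hres.2)
      · -- proc is not a key: no callees
        rw [pvGetD_nil_of_not_key c proc hk]
        simp only [List.foldl_nil, List.nil_append, goB]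

theorem pvTop' (c t : List (String × List String)) (proc : String) (vis : List String) :
    (goA c t (c.length + 1) proc vis).1
      = if PySem.Set.contains vis proc = true then []
        else PySem.List.dedup (goB c t [proc] vis []).1 := by
  have h1 := List.length_filter_le (fun k => decide (k ∉ vis)) ((c.map Prod.fst).dedup)
  have h2 : ((c.map Prod.fst).dedup).length ≤ (c.map Prod.fst).length :=
    (List.dedup_sublist _).length_le
  have hb : pvNK c vis + 1 ≤ c.length + 1 := by
    unfold pvNK
    simp only [List.length_map] at h2
    omega
  rw [pvMain c t (c.length + 1) vis proc hb]
  by_cases hc : PySem.Set.contains vis proc = true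
  · rw [if_pos hc, goB, if_pos hc, goB]
    rfl
  · rw [if_neg hc]

theorem pvTop (proc_name : String) (calls_map tables_map : List (String × List String))
    (visited : Option (List String)) :
    resolve_tables proc_name calls_map tables_map visited
      = resolve_tables_alt proc_name calls_map tables_map visited := by
  cases visited with
  | none => exact pvTop' calls_map tables_map proc_name PySem.Set.empty
  | some l => exact pvTop' calls_map tables_map proc_name (PySem.Set.ofList l)

-- ===== VERDICT (by name: the statement is the Claim_ definition above) =====
theorem resolve_tables_spec : Claim_equal_resolve_tables := by
  intro proc_name calls_map tables_map visited _
  unfold Spec_resolve_tables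
  exact pvTop proc_name calls_map tables_map visited
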